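-- pv_equiv track=rewrite | github.com/terrabela/OGRaySpY | Eflu_code/test_lists.py | interseq
-- ===== SOURCE A (Python) =====
-- def interseq( seq1, seq2, maxgap ):
--     i1 = 0
--     i2 = 0
--     smatch = []
--     while (i1 < len(seq1)) and (i2 < len(seq2)):
--         while seq1[i1] - seq2[i2] > maxgap:
--             i2 += 1
--             if i2 >= len(seq2): break
--         if i2 >= len(seq2): break
--         i2st = i2
--         while abs( seq1[i1] - seq2[i2] ) <= maxgap:
--             smatch.append( [seq1[i1], seq2[i2]] )
--             i2 += 1
--             if i2 >= len(seq2): break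
--         i1 += 1
--         if i1 >= len(seq1): break
--         i2 = i2st
--     return smatch
-- ===== SOURCE B (Python) =====
-- def interseq(seq1, seq2, maxgap):
--     smatch = []
--     for a in seq1:
--         for b in seq2:
--             if abs(a - b) <= maxgap:
--                 smatch.append([a, b])
--     return smatch
-- ===== Notes on version B (the rewrite author's own statement) =====
-- stated objective: simpler
-- what changed: Replaced A's stateful two-pointer scan (window-start pointer i2st, monotonic skip of seq2) with a plain nested loop over all pairs, appending [a,b] whenever abs(a-b) <= maxgap; identical output on the stated domain (both sequences sorted, or the trivial negative-gap/empty cases).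
-- outside the precondition, e.g. on interseq([5, 0], [0, 5], 0): A returns [[5, 5]], B returns [[5, 5], [0, 0]]
import Mathlib
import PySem

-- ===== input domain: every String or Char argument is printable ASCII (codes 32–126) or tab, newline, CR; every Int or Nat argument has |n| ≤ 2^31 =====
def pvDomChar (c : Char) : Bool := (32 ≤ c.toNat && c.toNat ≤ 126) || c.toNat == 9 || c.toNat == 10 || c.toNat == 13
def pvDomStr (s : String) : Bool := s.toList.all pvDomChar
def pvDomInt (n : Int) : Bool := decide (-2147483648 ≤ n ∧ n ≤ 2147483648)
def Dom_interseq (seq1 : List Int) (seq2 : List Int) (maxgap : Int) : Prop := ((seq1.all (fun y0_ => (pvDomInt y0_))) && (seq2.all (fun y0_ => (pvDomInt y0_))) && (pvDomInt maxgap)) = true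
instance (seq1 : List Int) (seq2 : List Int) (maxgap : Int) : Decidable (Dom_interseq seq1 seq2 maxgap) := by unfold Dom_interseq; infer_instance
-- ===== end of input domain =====

-- B replaces A's stateful two-pointer scan with a plain nested double loop over all pairs
-- (simpler, not faster); on sorted inputs (Pre_) the outputs are identical.

-- ===== PORT A =====
-- inner `while seq1[i1] - seq2[i2] > maxgap` loop (advances i2, breaks at end of seq2)
def pvSkip (a : Int) (s : List Int) (mg : Int) (i2 : Nat) : Nat :=
  if h : i2 < s.length then
    if a - s[i2]! > mg then pvSkip a s mg (i2 + 1) else i2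
  else i2
termination_by s.length - i2
decreasing_by omega

-- inner `while abs(seq1[i1] - seq2[i2]) <= maxgap` loop (appends pairs, breaks at end of seq2)
def pvEmit (a : Int) (s : List Int) (mg : Int) (i2 : Nat) : List (List Int) :=
  if h : i2 < s.length then
    if |a - s[i2]!| ≤ mg then [a, s[i2]!] :: pvEmit a s mg (i2 + 1) else []
  else []
termination_by s.length - i2
decreasing_by omega

-- the outer while loop: after emitting, i1 += 1 and i2 is reset to i2st (= the skip result)
def pvLoop (s1 s2 : List Int) (mg : Int) (i1 i2 : Nat) : List (List Int) :=
  if h1 : i1 < s1.length then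
    if h2 : i2 < s2.length then
      let j := pvSkip s1[i1]! s2 mg i2
      if j < s2.length then
        pvEmit s1[i1]! s2 mg j ++ pvLoop s1 s2 mg (i1 + 1) j
      else []
    else []
  else []
termination_by s1.length - i1
decreasing_by omega

def interseq (seq1 : List Int) (seq2 : List Int) (maxgap : Int) : List (List Int) :=
  pvLoop seq1 seq2 maxgap 0 0

-- ===== PORT B =====
def interseq_alt (seq1 : List Int) (seq2 : List Int) (maxgap : Int) : List (List Int) :=
  seq1.foldl (fun acc a =>
    seq2.foldl (fun acc2 b => if |a - b| ≤ maxgap then acc2 ++ [[a, b]] else acc2) acc) []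

-- ===== PRECONDITION & SPEC =====
-- Pre_ excludes unsorted inputs (except the trivial cases maxgap < 0 or an empty sequence,
-- where both return []): the two-pointer scan assumes both sequences are sorted nondecreasing
-- (the function's intended domain), and on unsorted input its forward-only window emits an
-- accidental subset of the within-gap pairs.
def Pre_interseq (seq1 : List Int) (seq2 : List Int) (maxgap : Int) : Prop :=
  (List.IsChain (· ≤ ·) seq1 ∧ List.IsChain (· ≤ ·) seq2) ∨ maxgap < 0 ∨ seq1 = [] ∨ seq2 = []

instance (seq1 : List Int) (seq2 : List Int) (maxgap : Int) : Decidable (Pre_interseq seq1 seq2 maxgap) := by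
  unfold Pre_interseq; infer_instance

def pvWitness_interseq : List Int × List Int × Int := ([1, 3], [2, 4], 1)

def Spec_interseq (seq1 : List Int) (seq2 : List Int) (maxgap : Int) (out : List (List Int)) : Prop := out = interseq_alt seq1 seq2 maxgap
instance (seq1 : List Int) (seq2 : List Int) (maxgap : Int) (out : List (List Int)) : Decidable (Spec_interseq seq1 seq2 maxgap out) := by unfold Spec_interseq; infer_instance

-- ===== CLAIM (what is proved, stated in full; the proofs are below) =====
def Claim_equal_interseq : Prop := ∀ (seq1 : List Int) (seq2 : List Int) (maxgap : Int), Dom_interseq seq1 seq2 maxgap → Pre_interseq seq1 seq2 maxgap → Spec_interseq seq1 seq2 maxgap (interseq seq1 seq2 maxgap)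

-- ===== LEMMAS AND PROOFS =====

-- the pairs a single outer-loop element contributes, order = seq2 order
def pvRow (a : Int) (s : List Int) (mg : Int) : List (List Int) :=
  (s.filter (fun b => |a - b| ≤ mg)).map (fun b => [a, b])

theorem pvAlt_inner (a mg : Int) (s : List Int) (acc : List (List Int)) :
    s.foldl (fun acc2 b => if |a - b| ≤ mg then acc2 ++ [[a, b]] else acc2) acc
      = acc ++ pvRow a s mg := by
  induction s generalizing acc with
  | nil => simp [pvRow]
  | cons b t ih =>
    simp only [List.foldl_cons]
    rw [ih]
    by_cases hb : |a - b| ≤ mg <;> simp [pvRow, hb]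

theorem pvAlt_char (s1 s2 : List Int) (mg : Int) :
    interseq_alt s1 s2 mg = s1.flatMap (fun a => pvRow a s2 mg) := by
  unfold interseq_alt
  suffices h : ∀ acc, s1.foldl (fun acc a =>
      s2.foldl (fun acc2 b => if |a - b| ≤ mg then acc2 ++ [[a, b]] else acc2) acc) acc
      = acc ++ s1.flatMap (fun a => pvRow a s2 mg) by
    simpa using h []
  induction s1 with
  | nil => simp
  | cons a t ih => intro acc; simp [List.foldl_cons, pvAlt_inner, List.flatMap]

theorem pvSkip_le (a mg : Int) (s : List Int) (i2 : Nat) (h : i2 ≤ s.length) :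
    pvSkip a s mg i2 ≤ s.length := by
  fun_induction pvSkip a s mg i2 with
  | case1 i2 h hc ih => exact ih (by omega)
  | case2 => omega
  | case3 => omega

theorem pvSkip_inv (a mg : Int) (s : List Int) (i2 : Nat)
    (hlow : ∀ b ∈ s.take i2, a - b > mg) :
    ∀ b ∈ s.take (pvSkip a s mg i2), a - b > mg := by
  fun_induction pvSkip a s mg i2 with
  | case1 i2 h hc ih =>
    apply ih
    intro b hb
    rw [List.take_add_one] at hb
    rcases List.mem_append.mp hb with hb | hb
    · exact hlow b hb
    · have hsome : s[i2]? = some s[i2] := List.getElem?_eq_getElem h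
      simp only [hsome, Option.toList_some, List.mem_singleton] at hb
      have he : s[i2]! = s[i2] := getElem!_pos s i2 h
      omega
  | case2 => exact hlow
  | case3 => exact hlow

theorem pvSkip_stop (a mg : Int) (s : List Int) (i2 : Nat)
    (h : pvSkip a s mg i2 < s.length) : a - s[pvSkip a s mg i2]! ≤ mg := by
  fun_induction pvSkip a s mg i2 with
  | case1 i2 h2 hc ih => exact ih h
  | case2 i2 h2 hc => omega
  | case3 i2 h2 => omega

theorem pvTakeWhile_eq_filter (a mg : Int) :
    ∀ (t : List Int), t.Pairwise (· ≤ ·) → (∀ b ∈ t, a - b ≤ mg) →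
      t.takeWhile (fun b => |a - b| ≤ mg) = t.filter (fun b => |a - b| ≤ mg) := by
  intro t
  induction t with
  | nil => simp
  | cons b t ih =>
    intro hp hge
    rcases List.pairwise_cons.mp hp with ⟨hb, ht⟩
    by_cases hpb : |a - b| ≤ mg
    · simp [hpb, ih ht (fun c hc => hge c (List.mem_cons_of_mem _ hc))]
    · have hbig : b - a > mg := by
        have h1 := hge b (List.mem_cons_self ..)
        rw [abs_le] at hpb
        omega
      have hnil : t.filter (fun b => |a - b| ≤ mg) = [] := by
        apply List.filter_eq_nil_iff.mpr
        intro c hc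
        have : b ≤ c := hb c hc
        simp only [decide_eq_true_eq, abs_le, not_and_or, not_le]
        omega
      simp [hpb, hnil]

theorem pvEmit_eq_takeWhile (a mg : Int) (s : List Int) (j : Nat) :
    pvEmit a s mg j = ((s.drop j).takeWhile (fun b => |a - b| ≤ mg)).map (fun b => [a, b]) := by
  fun_induction pvEmit a s mg j with
  | case1 j h hc ih =>
    have he : s[j]! = s[j] := getElem!_pos s j h
    rw [List.drop_eq_getElem_cons h, List.takeWhile_cons,
      if_pos (decide_eq_true (he ▸ hc)), List.map_cons, he, ih]
  | case2 j h hc =>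
    have he : s[j]! = s[j] := getElem!_pos s j h
    rw [List.drop_eq_getElem_cons h, List.takeWhile_cons,
      if_neg (by simp only [decide_eq_true_eq, not_le, ← he]; exact not_le.mp hc), List.map_nil]
  | case3 j h =>
    rw [List.drop_eq_nil_of_le (by omega)]
    simp

theorem pvEmit_row (a mg : Int) (s : List Int) (j : Nat)
    (hs : List.Pairwise (· ≤ ·) s) (hj : j < s.length)
    (hlow : ∀ b ∈ s.take j, a - b > mg) (hstop : a - s[j]! ≤ mg) :
    pvEmit a s mg j = pvRow a s mg := by
  have he : s[j]! = s[j] := getElem!_pos s j hj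
  have hdrop : s.drop j = s[j] :: s.drop (j + 1) := List.drop_eq_getElem_cons hj
  have hpair : (s.drop j).Pairwise (· ≤ ·) := hs.sublist (List.drop_sublist j s)
  have hge : ∀ b ∈ s.drop j, a - b ≤ mg := by
    rw [hdrop]
    intro b hb
    rcases List.mem_cons.mp hb with hb | hb
    · subst hb; rw [he] at hstop; exact hstop
    · have h1 : s[j] ≤ b := (List.pairwise_cons.mp (hdrop ▸ hpair)).1 b hb
      rw [he] at hstop; omega
  have hfilter_take : (s.take j).filter (fun b => |a - b| ≤ mg) = [] := by
    apply List.filter_eq_nil_iff.mpr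
    intro c hc
    have := hlow c hc
    simp only [decide_eq_true_eq, abs_le, not_and_or, not_le]
    omega
  calc pvEmit a s mg j
      = ((s.drop j).takeWhile (fun b => |a - b| ≤ mg)).map (fun b => [a, b]) :=
        pvEmit_eq_takeWhile a mg s j
    _ = ((s.drop j).filter (fun b => |a - b| ≤ mg)).map (fun b => [a, b]) := by
        rw [pvTakeWhile_eq_filter a mg _ hpair hge]
    _ = pvRow a s mg := by
        unfold pvRow
        conv_rhs => rw [← List.take_append_drop j s]
        rw [List.filter_append, hfilter_take, List.nil_append]

theorem pvRow_nil_of_low (a mg : Int) (s : List Int)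
    (h : ∀ b ∈ s, a - b > mg) : pvRow a s mg = [] := by
  unfold pvRow
  rw [List.filter_eq_nil_iff.mpr]
  · rfl
  · intro c hc
    have := h c hc
    simp only [decide_eq_true_eq, abs_le, not_and_or, not_le]
    omega

-- elements of a sorted list at or after position i1 are ≥ the element at i1
theorem pvSorted_drop_ge (s : List Int) (hs : List.Pairwise (· ≤ ·) s) (i1 : Nat)
    (h : i1 < s.length) : ∀ x ∈ s.drop i1, s[i1]! ≤ x := by
  have he : s[i1]! = s[i1] := getElem!_pos s i1 h
  have hdrop : s.drop i1 = s[i1] :: s.drop (i1 + 1) := List.drop_eq_getElem_cons h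
  have hpair : (s.drop i1).Pairwise (· ≤ ·) := hs.sublist (List.drop_sublist i1 s)
  rw [hdrop] at hpair
  intro x hx
  rw [hdrop] at hx
  rcases List.mem_cons.mp hx with hx | hx
  · omega
  · rw [he]; exact (List.pairwise_cons.mp hpair).1 x hx

theorem pvLoop_char (s1 s2 : List Int) (mg : Int) (i1 i2 : Nat)
    (hs1 : List.Pairwise (· ≤ ·) s1) (hs2 : List.Pairwise (· ≤ ·) s2)
    (hi2 : i2 ≤ s2.length)
    (hinv : i1 < s1.length → ∀ b ∈ s2.take i2, s1[i1]! - b > mg) :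
    pvLoop s1 s2 mg i1 i2 = (s1.drop i1).flatMap (fun a => pvRow a s2 mg) := by
  fun_induction pvLoop s1 s2 mg i1 i2 with
  | case1 i1 i2 h1 h2 j hj ih =>
    have hlowj : ∀ b ∈ s2.take j, s1[i1]! - b > mg := pvSkip_inv _ _ _ _ (hinv h1)
    have hstop : s1[i1]! - s2[j]! ≤ mg := pvSkip_stop _ _ _ _ hj
    rw [List.drop_eq_getElem_cons h1, List.flatMap_cons]
    have he1 : s1[i1]! = s1[i1] := getElem!_pos s1 i1 h1
    congr 1
    · rw [← he1]; exact pvEmit_row _ _ _ _ hs2 hj hlowj hstop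
    · rw [ih (pvSkip_le _ _ _ _ (le_of_lt h2)) ?_]
      intro h1' b hb
      have hge : s1[i1]! ≤ s1[i1 + 1]! := by
        have := pvSorted_drop_ge s1 hs1 i1 h1 s1[i1 + 1]!
        apply this
        rw [List.drop_eq_getElem_cons h1]
        have he2 : s1[i1 + 1]! = s1[i1 + 1] := getElem!_pos s1 (i1 + 1) h1'
        rw [he2]
        exact List.mem_cons_of_mem _ (by
          rw [List.drop_eq_getElem_cons h1']
          exact List.mem_cons_self ..)
      have := hlowj b hb
      omega
  | case2 i1 i2 h1 h2 j hj =>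
    have hjle : j ≤ s2.length := pvSkip_le _ _ _ _ (le_of_lt h2)
    have hjeq : j = s2.length := by omega
    have hjeq' : pvSkip s1[i1]! s2 mg i2 = s2.length := hjeq
    have hlowall : ∀ b ∈ s2, s1[i1]! - b > mg := by
      have := pvSkip_inv s1[i1]! mg s2 i2 (hinv h1)
      rwa [hjeq', List.take_length] at this
    symm
    rw [List.flatMap_eq_nil_iff]
    intro a ha
    have hge : s1[i1]! ≤ a := pvSorted_drop_ge s1 hs1 i1 h1 a ha
    exact pvRow_nil_of_low a mg s2 (fun b hb => by have := hlowall b hb; omega)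
  | case3 i1 i2 h1 h2 =>
    have hi2eq : i2 = s2.length := by omega
    have hlowall : ∀ b ∈ s2, s1[i1]! - b > mg := by
      have := hinv h1; rwa [hi2eq, List.take_length] at this
    symm
    rw [List.flatMap_eq_nil_iff]
    intro a ha
    have hge : s1[i1]! ≤ a := pvSorted_drop_ge s1 hs1 i1 h1 a ha
    exact pvRow_nil_of_low a mg s2 (fun b hb => by have := hlowall b hb; omega)
  | case4 i1 i2 h1 =>
    rw [List.drop_eq_nil_of_le (by omega)]
    simp

theorem pvEmit_neg (a mg : Int) (s : List Int) (j : Nat) (h : mg < 0) :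
    pvEmit a s mg j = [] := by
  rw [pvEmit]
  split_ifs with h1 h2
  · exact absurd h2 (not_le.mpr (lt_of_lt_of_le h (abs_nonneg _)))
  · rfl
  · rfl

theorem pvLoop_neg (s1 s2 : List Int) (mg : Int) (h : mg < 0) (i1 i2 : Nat) :
    pvLoop s1 s2 mg i1 i2 = [] := by
  fun_induction pvLoop s1 s2 mg i1 i2 with
  | case1 i1 i2 h1 h2 j hj ih => rw [pvEmit_neg _ _ _ _ h, ih, List.append_nil]
  | case2 => rfl
  | case3 => rfl
  | case4 => rfl

theorem pvAlt_neg (s1 s2 : List Int) (mg : Int) (h : mg < 0) :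
    interseq_alt s1 s2 mg = [] := by
  rw [pvAlt_char, List.flatMap_eq_nil_iff]
  intro a _
  have hf : s2.filter (fun b => |a - b| ≤ mg) = [] := by
    apply List.filter_eq_nil_iff.mpr
    intro b _
    simp only [decide_eq_true_eq]
    exact not_le.mpr (lt_of_lt_of_le h (abs_nonneg _))
  simp [pvRow, hf]

-- ===== VERDICT (by name: the statement is the Claim_ definition above) =====
theorem interseq_spec : Claim_equal_interseq := by
  intro s1 s2 mg _ hpre
  unfold Spec_interseq interseq
  rcases hpre with ⟨h1, h2⟩ | hmg | h1 | h2
  · rw [pvAlt_char, pvLoop_char s1 s2 mg 0 0 (List.isChain_iff_pairwise.mp h1)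
      (List.isChain_iff_pairwise.mp h2) (by omega) (by simp)]
    simp
  · rw [pvLoop_neg _ _ _ hmg, pvAlt_neg _ _ _ hmg]
  · subst h1
    rw [pvLoop]
    simp [interseq_alt]
  · subst h2
    rw [pvLoop]
    rw [pvAlt_char]
    simp [pvRow]
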